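-- pv_equiv track=rewrite | github.com/tinotendanyashanu/zimprep | backend/app/engines/question_delivery/rules/locking_rules.py | apply_forward_only_locking
-- ===== SOURCE A (Python) =====
-- from typing import List, Set
--
-- def apply_forward_only_locking(
--     current_index: int,
--     previous_index: int,
--     already_locked: List[int]
-- ) -> List[int]:
--     """Apply locking for forward-only navigation.
--
--     In forward-only mode, lock all questions behind current position.
--
--     Args:
--         current_index: Current question index
--         previous_index: Previous question index
--         already_locked: Already locked questions
--
--     Returns:
--         Updated list of locked question indices
--     """
--     locked_set = set(already_locked)
--
--     # Lock all questions before current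
--     for i in range(current_index):
--         locked_set.add(i)
--
--     return sorted(list(locked_set))
-- ===== SOURCE B (Python) =====
-- def apply_forward_only_locking(current_index, previous_index, already_locked):
--     n = current_index if current_index > 0 else 0
--     lows = sorted({x for x in already_locked if x < 0})
--     highs = sorted({x for x in already_locked if x >= n})
--     return lows + list(range(n)) + highs
-- ===== Notes on version B (the rewrite author's own statement) =====
-- stated objective: alternative
-- what changed: Instead of inserting every index of range(current_index) into a set and sorting the union, B partitions already_locked into sorted unique negatives and sorted unique entries >= current_index and concatenates them around the contiguous block list(range(current_index)), never materialising the block inside a set.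
import Mathlib
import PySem

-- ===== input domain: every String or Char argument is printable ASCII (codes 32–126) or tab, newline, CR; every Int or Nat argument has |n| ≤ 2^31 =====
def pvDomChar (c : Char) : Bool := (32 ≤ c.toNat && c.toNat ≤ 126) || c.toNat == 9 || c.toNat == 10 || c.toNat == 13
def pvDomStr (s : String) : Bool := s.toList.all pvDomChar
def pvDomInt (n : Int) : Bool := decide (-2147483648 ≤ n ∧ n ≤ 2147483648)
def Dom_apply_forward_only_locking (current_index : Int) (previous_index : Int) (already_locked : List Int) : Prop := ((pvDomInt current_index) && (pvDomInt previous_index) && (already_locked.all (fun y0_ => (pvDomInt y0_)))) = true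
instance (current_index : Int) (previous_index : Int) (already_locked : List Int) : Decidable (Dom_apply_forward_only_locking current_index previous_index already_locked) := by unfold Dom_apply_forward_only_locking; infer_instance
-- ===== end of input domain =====

-- B replaces A's set-union-then-sort (insert every index of range(current_index) into the set,
-- then sort the whole union) by a partition: sorted unique negatives ++ range block ++ sorted
-- unique entries >= current_index; objective: alternative decomposition, same result.


-- ===== PORT A =====
-- locked_set = set(already_locked); for i in range(current_index): locked_set.add(i); return sorted(list(locked_set))
def apply_forward_only_locking (current_index : Int) (previous_index : Int) (already_locked : List Int) : List Int :=
  let locked_set : PySem.Set Int :=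
    (PySem.List.pyRange 0 current_index 1).foldl (fun s i => PySem.Set.add s i) (PySem.Set.ofList already_locked)
  PySem.List.sorted locked_set (fun x => x) false

-- ===== PORT B =====
def apply_forward_only_locking_alt (current_index : Int) (previous_index : Int) (already_locked : List Int) : List Int :=
  let n : Int := if current_index > 0 then current_index else 0
  let lows := PySem.List.sorted (PySem.Set.ofList (already_locked.filter (fun x => x < 0))) (fun x => x) false
  let highs := PySem.List.sorted (PySem.Set.ofList (already_locked.filter (fun x => n ≤ x))) (fun x => x) false
  lows ++ PySem.List.pyRange 0 n 1 ++ highs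

-- ===== PRECONDITION & SPEC =====
def Spec_apply_forward_only_locking (current_index : Int) (previous_index : Int) (already_locked : List Int) (out : List Int) : Prop := out = apply_forward_only_locking_alt current_index previous_index already_locked
instance (current_index : Int) (previous_index : Int) (already_locked : List Int) (out : List Int) : Decidable (Spec_apply_forward_only_locking current_index previous_index already_locked out) := by unfold Spec_apply_forward_only_locking; infer_instance

-- ===== CLAIM (what is proved, stated in full; the proofs are below) =====
def Claim_equal_apply_forward_only_locking : Prop := ∀ (current_index : Int) (previous_index : Int) (already_locked : List Int), Dom_apply_forward_only_locking current_index previous_index already_locked → Spec_apply_forward_only_locking current_index previous_index already_locked (apply_forward_only_locking current_index previous_index already_locked)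

-- ===== LEMMAS AND PROOFS =====

-- folding Set.add over a list keeps the no-duplicates invariant
theorem pv_nodup_foldl_add (l : List Int) (s : PySem.Set Int) (hs : s.Nodup) :
    (l.foldl (fun s i => PySem.Set.add s i) s).Nodup := by
  induction l generalizing s with
  | nil => exact hs
  | cons a t ih =>
    simp only [List.foldl_cons]
    exact ih _ (PySem.Set.nodup_add s a hs)

-- membership after folding Set.add over a list
theorem pv_mem_foldl_add (l : List Int) (s : PySem.Set Int) (x : Int) :
    x ∈ l.foldl (fun s i => PySem.Set.add s i) s ↔ x ∈ s ∨ x ∈ l := by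
  induction l generalizing s with
  | nil => simp
  | cons a t ih =>
    simp only [List.foldl_cons, ih, PySem.Set.mem_add, List.mem_cons]
    tauto

theorem apply_forward_only_locking_eq (current_index previous_index : Int) (already_locked : List Int) :
    apply_forward_only_locking current_index previous_index already_locked
      = apply_forward_only_locking_alt current_index previous_index already_locked := by
  unfold apply_forward_only_locking apply_forward_only_locking_alt
  set n : Int := if current_index > 0 then current_index else 0 with hn
  have hn0 : 0 ≤ n := by rw [hn]; split <;> omega
  set lows := PySem.List.sorted (PySem.Set.ofList (already_locked.filter (fun x => x < 0))) (fun x => x) false with hlows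
  set highs := PySem.List.sorted (PySem.Set.ofList (already_locked.filter (fun x => n ≤ x))) (fun x => x) false with hhighs
  have hmlow : ∀ x ∈ lows, x ∈ already_locked ∧ x < 0 := by
    intro x hx
    rw [hlows] at hx
    simpa [PySem.List.mem_sorted, PySem.Set.mem_ofList, List.mem_filter] using hx
  have hmhigh : ∀ x ∈ highs, x ∈ already_locked ∧ n ≤ x := by
    intro x hx
    rw [hhighs] at hx
    simpa [PySem.List.mem_sorted, PySem.Set.mem_ofList, List.mem_filter] using hx
  -- the concatenation is strictly increasing
  have hpair : (lows ++ PySem.List.pyRange 0 n 1 ++ highs).Pairwise (fun a b => a < b) := by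
    rw [List.append_assoc]
    refine List.pairwise_append.mpr ⟨?_, List.pairwise_append.mpr ⟨?_, ?_, ?_⟩, ?_⟩
    · rw [hlows]; exact PySem.List.sorted_ofList_pairwise_lt _
    · exact PySem.List.pairwise_lt_pyRange_one 0 n
    · rw [hhighs]; exact PySem.List.sorted_ofList_pairwise_lt _
    · intro a ha b hb
      have h1 := (PySem.List.mem_pyRange_one.mp ha).2
      have h2 := (hmhigh b hb).2
      omega
    · intro a ha b hb
      have h1 := (hmlow a ha).2
      rcases List.mem_append.mp hb with hb | hb
      · have := (PySem.List.mem_pyRange_one.mp hb).1; omega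
      · have := (hmhigh b hb).2; omega
  have hnodup : (lows ++ PySem.List.pyRange 0 n 1 ++ highs).Nodup :=
    hpair.imp (fun h => Int.ne_of_lt h)
  have hnodupS : ((PySem.List.pyRange 0 current_index 1).foldl (fun s i => PySem.Set.add s i)
      (PySem.Set.ofList already_locked)).Nodup :=
    pv_nodup_foldl_add _ _ (PySem.Set.nodup_ofList already_locked)
  have hmem : ∀ x : Int, x ∈ lows ++ PySem.List.pyRange 0 n 1 ++ highs ↔
      x ∈ (PySem.List.pyRange 0 current_index 1).foldl (fun s i => PySem.Set.add s i)
        (PySem.Set.ofList already_locked) := by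
    intro x
    rw [pv_mem_foldl_add]
    simp only [List.mem_append, PySem.List.mem_pyRange_one, PySem.Set.mem_ofList]
    constructor
    · rintro ((hx | hx) | hx)
      · exact Or.inl (hmlow x hx).1
      · rw [hn] at hx; split at hx <;> [exact Or.inr hx; omega]
      · exact Or.inl (hmhigh x hx).1
    · rintro (hx | hx)
      · by_cases hlt : x < 0
        · refine Or.inl (Or.inl ?_)
          rw [hlows]
          simp only [PySem.List.mem_sorted, PySem.Set.mem_ofList, List.mem_filter]
          exact ⟨hx, by simpa using hlt⟩
        · by_cases hge : n ≤ x
          · refine Or.inr ?_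
            rw [hhighs]
            simp only [PySem.List.mem_sorted, PySem.Set.mem_ofList, List.mem_filter]
            exact ⟨hx, by simpa using hge⟩
          · exact Or.inl (Or.inr ⟨by omega, by omega⟩)
      · exact Or.inl (Or.inr (by rw [hn]; split <;> omega))
  have hperm : (lows ++ PySem.List.pyRange 0 n 1 ++ highs).Perm
      ((PySem.List.pyRange 0 current_index 1).foldl (fun s i => PySem.Set.add s i)
        (PySem.Set.ofList already_locked)) :=
    (List.perm_ext_iff_of_nodup hnodup hnodupS).mpr hmem
  exact PySem.List.sorted_eq_of_perm_of_pairwise_lt _ _ _ hperm hpair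

-- ===== VERDICT (by name: the statement is the Claim_ definition above) =====
theorem apply_forward_only_locking_spec : Claim_equal_apply_forward_only_locking := by
  intro ci pi al _
  exact apply_forward_only_locking_eq ci pi al
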